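-- pv_equiv track=rewrite | github.com/Yuyats/AtCoderAnswers | real_time/abc/116/3.py | find_start_idx
-- ===== SOURCE A (Python) =====
-- def find_start_idx(l, min_idx):
--     if len(l[:min_idx]) == 0:
--         return 0
--     for idx, i in enumerate(reversed(l[:min_idx])):
--         if i == 0:
--             return idx
--     else:
--         return len(l[:min_idx])-1
-- ===== SOURCE B (Python) =====
-- def find_start_idx(l, min_idx):
--     p = l[:min_idx]
--     n = len(p)
--     if n == 0:
--         return 0
--     last = None
--     for i, v in enumerate(p):
--         if v == 0:
--             last = i
--     return n - 1 - last if last is not None else n - 1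
-- ===== Notes on version B (the rewrite author's own statement) =====
-- stated objective: alternative
-- what changed: Replaces A's reverse-iteration early-return scan with a single forward pass that maintains the last-seen zero index and converts it to a distance from the end after the loop; no reversed() copy and no early exit.
import Mathlib
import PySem

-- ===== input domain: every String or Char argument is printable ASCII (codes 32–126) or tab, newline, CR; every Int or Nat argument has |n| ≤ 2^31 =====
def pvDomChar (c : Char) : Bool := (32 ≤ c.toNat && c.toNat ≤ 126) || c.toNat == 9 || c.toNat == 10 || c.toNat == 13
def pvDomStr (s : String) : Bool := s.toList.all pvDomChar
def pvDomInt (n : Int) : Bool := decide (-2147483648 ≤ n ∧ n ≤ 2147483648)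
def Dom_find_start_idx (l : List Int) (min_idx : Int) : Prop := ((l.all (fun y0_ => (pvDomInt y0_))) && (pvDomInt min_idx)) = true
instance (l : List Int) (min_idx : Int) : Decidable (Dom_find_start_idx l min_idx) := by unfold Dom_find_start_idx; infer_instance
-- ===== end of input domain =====

-- B replaces A's reverse-iteration early-return scan by a single forward pass that
-- maintains the last-seen zero index (objective: alternative decomposition, same cost).


-- ===== PORT A =====
-- 'for idx, i in enumerate(reversed(p)): if i == 0: return idx' + the for-else default:
def pvScanRevA : List Int → Int → Int → Int
  | [], _, dflt => dflt
  | x :: xs, idx, dflt => if x = 0 then idx else pvScanRevA xs (idx + 1) dflt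

def find_start_idx (l : List Int) (min_idx : Int) : Int :=
  let p := PySem.List.slice l none (some min_idx)   -- l[:min_idx]
  if p.length = 0 then 0
  else pvScanRevA p.reverse 0 ((p.length : Int) - 1)

-- ===== PORT B =====
def find_start_idx_alt (l : List Int) (min_idx : Int) : Int :=
  let p := PySem.List.slice l none (some min_idx)   -- p = l[:min_idx]
  let n : Int := (p.length : Int)
  if p.length = 0 then 0
  else
    -- forward pass: last := i whenever v == 0
    let last := (PySem.List.enumerate p 0).foldl
      (fun acc (pr : Int × Int) => if pr.2 = 0 then some pr.1 else acc) none
    match last with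
    | some i => n - 1 - i
    | none => n - 1

-- ===== PRECONDITION & SPEC =====
def Spec_find_start_idx (l : List Int) (min_idx : Int) (out : Int) : Prop := out = find_start_idx_alt l min_idx
instance (l : List Int) (min_idx : Int) (out : Int) : Decidable (Spec_find_start_idx l min_idx out) := by unfold Spec_find_start_idx; infer_instance

-- ===== CLAIM (what is proved, stated in full; the proofs are below) =====
def Claim_equal_find_start_idx : Prop := ∀ (l : List Int) (min_idx : Int), Dom_find_start_idx l min_idx → Spec_find_start_idx l min_idx (find_start_idx l min_idx)

-- ===== LEMMAS AND PROOFS =====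

-- index of the first zero, used only in the proofs to characterise both loops
def pvFirstZ : List Int → Option Nat
  | [] => none
  | x :: xs => if x = 0 then some 0 else (pvFirstZ xs).map (· + 1)

theorem pvFirstZ_lt {q : List Int} {k : Nat} (h : pvFirstZ q = some k) : k < q.length := by
  induction q generalizing k with
  | nil => simp [pvFirstZ] at h
  | cons x xs ih =>
    simp only [pvFirstZ] at h
    split at h
    · simp_all; omega
    · rcases Option.map_eq_some_iff.mp h with ⟨m, hm, rfl⟩
      have := ih hm; simp; omega

theorem pvScanRevA_eq (q : List Int) (s d : Int) :
    pvScanRevA q s d = match pvFirstZ q with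
      | some k => s + (k : Int)
      | none => d := by
  induction q generalizing s with
  | nil => simp [pvScanRevA, pvFirstZ]
  | cons x xs ih =>
    simp only [pvScanRevA, pvFirstZ]
    split
    · simp
    · rw [ih]
      cases pvFirstZ xs <;> simp <;> ring_nf

theorem pvEnum_append (q : List Int) (x : Int) : ∀ (s : Int),
    PySem.List.enumerate (q ++ [x]) s = PySem.List.enumerate q s ++ [(s + (q.length : Int), x)] := by
  induction q with
  | nil => intro s; simp [PySem.List.enumerate_cons, PySem.List.enumerate_nil]
  | cons y ys ihy =>
    intro s
    simp only [List.cons_append, PySem.List.enumerate_cons, ihy]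
    simp; ring_nf

theorem pvLastZ_eq (p : List Int) (s : Int) (acc : Option Int) :
    (PySem.List.enumerate p s).foldl
        (fun acc (pr : Int × Int) => if pr.2 = 0 then some pr.1 else acc) acc =
      match pvFirstZ p.reverse with
      | some k => some (s + ((p.length - 1 - k : Nat) : Int))
      | none => acc := by
  induction p using List.reverseRecOn generalizing acc with
  | nil => simp [PySem.List.enumerate, pvFirstZ]
  | append_singleton q x ih =>
    rw [pvEnum_append, List.foldl_append]
    simp only [List.foldl_cons, List.foldl_nil, List.reverse_append, List.reverse_singleton,
      List.singleton_append, pvFirstZ]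
    split
    · simp
    · rw [ih]
      cases h : pvFirstZ q.reverse with
      | none => simp
      | some k =>
        have hk : k < q.length := by simpa using pvFirstZ_lt h
        simp only [Option.map_some, List.length_append, List.length_singleton]
        congr 1
        have : q.length + 1 - 1 - (k + 1) = q.length - 1 - k := by omega
        rw [this]

-- ===== VERDICT (by name: the statement is the Claim_ definition above) =====
theorem find_start_idx_spec : Claim_equal_find_start_idx := by
  intro l min_idx _
  unfold Spec_find_start_idx find_start_idx find_start_idx_alt
  set p := PySem.List.slice l none (some min_idx) with hp
  by_cases h0 : p.length = 0
  · simp [h0]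
  · simp only [h0, if_false]
    rw [pvScanRevA_eq, pvLastZ_eq]
    cases h : pvFirstZ p.reverse with
    | none => simp
    | some k =>
      have hk : k < p.length := by simpa using pvFirstZ_lt h
      simp only [zero_add]
      push_cast [Nat.cast_sub (by omega : k ≤ p.length - 1), Nat.cast_sub (by omega : 1 ≤ p.length)]
      ring
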